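-- pv_equiv track=rewrite | github.com/acellison/spherinder | geometric_boussinesq.py | permutation_indices
-- ===== SOURCE A (Python) =====
-- def permutation_indices(Lmax, Nmax):
--     """For each mode interlace the five field variables.  Returns two lists of
--        permutation indices, the first for the columns (variable ordering), and
--        the second for the rows (equation sorting).  Leaves tau variables as the
--        final set of coefficients so the tau columns are in the same location -
--        horizontally block appended to the matrix"""
--     nfields = 5
--     nvar = Lmax*Nmax
--     neqn = (Lmax+2)*(Nmax+1)
--     ntau = 2*(Nmax+1)+Lmax
--
--     variables = [range(i*nvar,(i+1)*nvar) for i in range(nfields)]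
--     equations = [range(i*neqn,(i+1)*neqn) for i in range(nfields)]
--
--     vartau = range(nfields*nvar,nfields*(nvar+ntau))
--     varindices = [val for tup in zip(*variables) for val in tup]
--     varindices = varindices + list(vartau)
--     eqnindices = [val for tup in zip(*equations) for val in tup]
--     return varindices, eqnindices
-- ===== SOURCE B (Python) =====
-- def permutation_indices(Lmax, Nmax):
--     """Compute each interleaved index directly by modular arithmetic instead of
--        transposing per-field range lists."""
--     nfields = 5
--     nvar = Lmax*Nmax
--     neqn = (Lmax+2)*(Nmax+1)
--     ntau = 2*(Nmax+1)+Lmax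
--     varindices = [(k % nfields)*nvar + k//nfields for k in range(nfields*nvar)]
--     varindices += list(range(nfields*nvar, nfields*(nvar+ntau)))
--     eqnindices = [(k % nfields)*neqn + k//nfields for k in range(nfields*neqn)]
--     return varindices, eqnindices
-- ===== Notes on version B (the rewrite author's own statement) =====
-- stated objective: simpler
-- what changed: Replaces the five per-field range lists and the zip-transpose-flatten with a single comprehension that computes each interleaved position directly as (k % nfields)*stride + k//nfields; no intermediate range lists or transpose are maintained.
import Mathlib
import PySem

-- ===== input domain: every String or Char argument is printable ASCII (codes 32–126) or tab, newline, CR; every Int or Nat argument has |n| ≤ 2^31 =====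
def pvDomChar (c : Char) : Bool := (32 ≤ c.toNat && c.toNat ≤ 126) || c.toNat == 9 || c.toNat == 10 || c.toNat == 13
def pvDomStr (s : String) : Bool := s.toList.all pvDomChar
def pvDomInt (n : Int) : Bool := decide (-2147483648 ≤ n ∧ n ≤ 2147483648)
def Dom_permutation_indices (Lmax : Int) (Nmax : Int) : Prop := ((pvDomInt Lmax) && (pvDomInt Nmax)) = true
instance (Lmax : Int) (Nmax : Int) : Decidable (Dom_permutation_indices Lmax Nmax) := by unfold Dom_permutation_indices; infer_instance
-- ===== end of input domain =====

-- B computes each interleaved index directly by modular arithmetic (one comprehension),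
-- replacing A's five per-field range lists and the zip-transpose-flatten; objective: simpler.

-- ===== PORT A =====
-- zip(*ls) for a list of lists: stops at the shortest list (exact for Python's zip)
def pyZipStar (ls : List (List Int)) : List (List Int) :=
  if ls.isEmpty || ls.any List.isEmpty then []
  else (ls.map (fun l => l.headD 0)) :: pyZipStar (ls.map List.tail)
termination_by (ls.headD []).length
decreasing_by
  rename_i h
  match ls with
  | [] => simp at h
  | [] :: rest => simp at h
  | (a :: t) :: rest => simp [List.headD]

def permutation_indices (Lmax : Int) (Nmax : Int) : List Int × List Int :=
  let nfields : Int := 5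
  let nvar := Lmax*Nmax
  let neqn := (Lmax+2)*(Nmax+1)
  let ntau := 2*(Nmax+1)+Lmax
  let vars := (PySem.List.pyRange 0 nfields 1).map (fun i => PySem.List.pyRange (i*nvar) ((i+1)*nvar) 1)
  let equations := (PySem.List.pyRange 0 nfields 1).map (fun i => PySem.List.pyRange (i*neqn) ((i+1)*neqn) 1)
  let vartau := PySem.List.pyRange (nfields*nvar) (nfields*(nvar+ntau)) 1
  let varindices := (pyZipStar vars).flatten
  let varindices := varindices ++ vartau
  let eqnindices := (pyZipStar equations).flatten
  (varindices, eqnindices)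

-- ===== PORT B =====
def permutation_indices_alt (Lmax : Int) (Nmax : Int) : List Int × List Int :=
  let nfields : Int := 5
  let nvar := Lmax*Nmax
  let neqn := (Lmax+2)*(Nmax+1)
  let ntau := 2*(Nmax+1)+Lmax
  let varindices := (PySem.List.pyRange 0 (nfields*nvar) 1).map
    (fun k => (PySem.Int.mod k nfields)*nvar + PySem.Int.floordiv k nfields)
  let varindices := varindices ++ PySem.List.pyRange (nfields*nvar) (nfields*(nvar+ntau)) 1
  let eqnindices := (PySem.List.pyRange 0 (nfields*neqn) 1).map
    (fun k => (PySem.Int.mod k nfields)*neqn + PySem.Int.floordiv k nfields)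
  (varindices, eqnindices)

-- ===== PRECONDITION & SPEC =====
def Spec_permutation_indices (Lmax : Int) (Nmax : Int) (out : List Int × List Int) : Prop := out = permutation_indices_alt Lmax Nmax
instance (Lmax : Int) (Nmax : Int) (out : List Int × List Int) : Decidable (Spec_permutation_indices Lmax Nmax out) := by unfold Spec_permutation_indices; infer_instance

-- ===== CLAIM (what is proved, stated in full; the proofs are below) =====
def Claim_equal_permutation_indices : Prop := ∀ (Lmax : Int) (Nmax : Int), Dom_permutation_indices Lmax Nmax → Spec_permutation_indices Lmax Nmax (permutation_indices Lmax Nmax)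

-- ===== LEMMAS AND PROOFS =====
theorem pyZipStar_stop (ls : List (List Int)) (h : ls.isEmpty || ls.any List.isEmpty) :
    pyZipStar ls = [] := by
  rw [pyZipStar]; simp_all

theorem pyZipStar_cons (ls : List (List Int)) (h1 : ls ≠ []) (h2 : ls.any List.isEmpty = false) :
    pyZipStar ls = (ls.map (fun l => l.headD 0)) :: pyZipStar (ls.map List.tail) := by
  rw [pyZipStar]
  simp [h2, List.isEmpty_iff, h1]

theorem zipStar_five (m : Nat) (f0 f1 f2 f3 f4 : Nat → Int) :
    pyZipStar [(List.range m).map f0, (List.range m).map f1, (List.range m).map f2,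
               (List.range m).map f3, (List.range m).map f4]
      = (List.range m).map (fun j => [f0 j, f1 j, f2 j, f3 j, f4 j]) := by
  induction m generalizing f0 f1 f2 f3 f4 with
  | zero => simp [pyZipStar_stop]
  | succ m ih =>
    rw [List.range_succ_eq_map]
    simp only [List.map_cons, List.map_map]
    rw [pyZipStar_cons _ (by simp) (by simp)]
    simp only [List.map_cons, List.map_nil, List.headD_cons, List.tail_cons]
    rw [ih]
    simp [Function.comp, Nat.succ_eq_add_one]

-- B's direct index map over 5*m positions, grouped into blocks of five (stride n fixed)
theorem direct_blocks (n : Int) (m : Nat) :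
    ((List.range (5*m)).map (fun k : Nat => (0:Int) + (k:Int))).map
        (fun k => (PySem.Int.mod k 5)*n + PySem.Int.floordiv k 5)
      = ((List.range m).map (fun j : Nat =>
          [0*n+(j:Int), 1*n+(j:Int), 2*n+(j:Int), 3*n+(j:Int), 4*n+(j:Int)])).flatten := by
  have he : ∀ x : Int, (PySem.Int.mod x 5)*n + PySem.Int.floordiv x 5
      = (x % 5)*n + x / 5 := by
    intro x
    rw [PySem.Int.mod_eq_emod_of_pos (by norm_num), PySem.Int.floordiv_eq_ediv_of_pos (by norm_num)]
  induction m with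
  | zero => simp
  | succ m ih =>
    rw [show 5*(m+1) = 5*m+5 from by ring, List.range_add,
        show List.range 5 = [0,1,2,3,4] from by decide, List.range_succ]
    simp only [List.map_append, List.flatten_append]
    rw [ih]
    congr 1
    simp only [List.map_cons, List.map_nil, List.flatten_cons, List.flatten_nil,
      List.append_nil, he]
    have e0 : ((↑(5*m+0) : Int)) % 5 = 0 ∧ ((↑(5*m+0) : Int)) / 5 = m := by omega
    have e1 : ((↑(5*m+1) : Int)) % 5 = 1 ∧ ((↑(5*m+1) : Int)) / 5 = m := by omega
    have e2 : ((↑(5*m+2) : Int)) % 5 = 2 ∧ ((↑(5*m+2) : Int)) / 5 = m := by omega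
    have e3 : ((↑(5*m+3) : Int)) % 5 = 3 ∧ ((↑(5*m+3) : Int)) / 5 = m := by omega
    have e4 : ((↑(5*m+4) : Int)) % 5 = 4 ∧ ((↑(5*m+4) : Int)) / 5 = m := by omega
    simp only [zero_add, e0.1, e0.2, e1.1, e1.2, e2.1, e2.2, e3.1, e3.2, e4.1, e4.2]

-- A's zip-transpose-flatten over the five field ranges equals B's direct index map.
theorem interleave_eq (n : Int) :
    (pyZipStar ((PySem.List.pyRange 0 5 1).map
        (fun i => PySem.List.pyRange (i*n) ((i+1)*n) 1))).flatten
      = (PySem.List.pyRange 0 (5*n) 1).map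
          (fun k => (PySem.Int.mod k 5)*n + PySem.Int.floordiv k 5) := by
  rw [show PySem.List.pyRange 0 5 1 = [0,1,2,3,4] from by decide]
  by_cases hn : n ≤ 0
  · rw [PySem.List.pyRange_one_eq_nil (by omega : (5:Int)*n ≤ 0)]
    simp only [List.map_cons, List.map_nil]
    have h0 : ∀ i : Int, PySem.List.pyRange (i*n) ((i+1)*n) 1 = [] := by
      intro i
      exact PySem.List.pyRange_one_eq_nil (by nlinarith)
    rw [h0, h0, h0, h0, h0, pyZipStar_stop _ (by simp)]
    simp
  · push Not at hn
    obtain ⟨m, hm⟩ : ∃ m : Nat, n = (m : Int) := ⟨n.toNat, by omega⟩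
    subst hm
    have hr : ∀ i : Int, PySem.List.pyRange (i*m) ((i+1)*m) 1
        = (List.range m).map (fun t : Nat => i*(m:Int) + (t : Int)) := by
      intro i
      rw [PySem.List.pyRange_one,
        show ((i+1)*(m:Int) - i*(m:Int)) = ((m:Nat):Int) from by ring, Int.toNat_natCast]
    simp only [List.map_cons, List.map_nil]
    rw [hr, hr, hr, hr, hr, zipStar_five]
    rw [PySem.List.pyRange_one]
    have h5 : ((5:Int)*m - 0).toNat = 5*m := by omega
    rw [h5]
    rw [direct_blocks]

-- ===== VERDICT (by name: the statement is the Claim_ definition above) =====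
theorem permutation_indices_spec : Claim_equal_permutation_indices := by
  intro Lmax Nmax _
  unfold Spec_permutation_indices permutation_indices permutation_indices_alt
  simp only
  rw [interleave_eq, interleave_eq]
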